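-- pv_equiv track=rewrite | github.com/SCAI-Lab/ai_agent_chatbot | memobase/docs/experiments/chat_sessions/extract.py | chunk_messages
-- ===== SOURCE A (Python) =====
-- def chunk_messages(messages: list[dict], rounds_per_chunk: int) -> list[list[dict]]:
--     """Group messages so each chunk contains up to `rounds_per_chunk` user turns."""
--     chunks: list[list[dict]] = []
--     current_chunk: list[dict] = []
--     user_turns = 0
--     awaiting_round_close = False
--
--     for message in messages:
--         current_chunk.append(message)
--         role = message.get("role")
--
--         if role == "user":
--             user_turns += 1
--             if user_turns >= rounds_per_chunk:
--                 awaiting_round_close = True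
--         elif role == "assistant" and awaiting_round_close:
--             chunks.append(current_chunk)
--             current_chunk = []
--             user_turns = 0
--             awaiting_round_close = False
--
--     if current_chunk:
--         chunks.append(current_chunk)
--
--     return chunks
-- ===== SOURCE B (Python) =====
-- def _first_cut(messages, rounds_per_chunk):
--     """Index just after the first flush point, or None if no flush occurs."""
--     user_turns = 0
--     awaiting_round_close = False
--     for i, message in enumerate(messages):
--         role = message.get("role")
--         if role == "user":
--             user_turns += 1
--             if user_turns >= rounds_per_chunk:
--                 awaiting_round_close = True
--         elif role == "assistant" and awaiting_round_close:
--             return i + 1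
--     return None
--
--
-- def chunk_messages(messages: list[dict], rounds_per_chunk: int) -> list[list[dict]]:
--     """Group messages so each chunk contains up to `rounds_per_chunk` user turns."""
--     chunks = []
--     rest = messages
--     while rest:
--         cut = _first_cut(rest, rounds_per_chunk)
--         if cut is None:
--             chunks.append(rest)
--             break
--         chunks.append(rest[:cut])
--         rest = rest[cut:]
--     return chunks
-- ===== Notes on version B (the rewrite author's own statement) =====
-- stated objective: alternative
-- what changed: Separates boundary detection from chunk materialization: a helper scans for the index just after the first flush point, and the driver loop slices off that prefix and restarts on the suffix, instead of threading a growing current_chunk plus counters through one inline state machine.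
import Mathlib
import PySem

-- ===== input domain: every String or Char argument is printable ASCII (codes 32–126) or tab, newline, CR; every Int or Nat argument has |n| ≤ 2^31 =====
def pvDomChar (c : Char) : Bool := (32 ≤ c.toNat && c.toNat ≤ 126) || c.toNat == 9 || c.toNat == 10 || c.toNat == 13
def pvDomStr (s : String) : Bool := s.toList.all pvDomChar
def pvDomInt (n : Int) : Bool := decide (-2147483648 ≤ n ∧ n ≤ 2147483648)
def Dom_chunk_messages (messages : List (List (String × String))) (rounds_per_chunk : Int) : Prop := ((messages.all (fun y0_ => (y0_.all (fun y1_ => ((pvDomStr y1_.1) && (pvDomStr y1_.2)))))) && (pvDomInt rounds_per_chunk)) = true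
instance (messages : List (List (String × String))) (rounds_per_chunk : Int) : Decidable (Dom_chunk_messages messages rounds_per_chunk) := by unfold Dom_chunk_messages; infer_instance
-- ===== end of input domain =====

-- B is an alternative decomposition (boundary detection then slicing), same cost; return-value equivalence, neither version mutates its input.

-- ===== PORT A =====
-- one loop step of A: state = (chunks, current_chunk, user_turns, awaiting_round_close)
def chunkStepA (rounds_per_chunk : Int)
    (st : List (List (List (String × String))) × List (List (String × String)) × Int × Bool)
    (message : List (String × String)) :
    List (List (List (String × String))) × List (List (String × String)) × Int × Bool :=
  let current_chunk := st.2.1 ++ [message]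
  let role := (PySem.Dict.mk message).get? "role"
  if role == some "user" then
    let user_turns := st.2.2.1 + 1
    (st.1, current_chunk, user_turns,
      if user_turns ≥ rounds_per_chunk then true else st.2.2.2)
  else if role == some "assistant" && st.2.2.2 then
    (st.1 ++ [current_chunk], [], 0, false)
  else
    (st.1, current_chunk, st.2.2.1, st.2.2.2)

def chunk_messages (messages : List (List (String × String))) (rounds_per_chunk : Int) : List (List (List (String × String))) :=
  let st := messages.foldl (chunkStepA rounds_per_chunk) ([], [], 0, false)
  if st.2.1 ≠ [] then st.1 ++ [st.2.1] else st.1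

-- ===== PORT B =====
-- _first_cut: index just after the first flush point, or none
def firstCut (rounds_per_chunk : Int) :
    List (List (String × String)) → Int → Bool → Option Nat
  | [], _, _ => none
  | message :: rest, user_turns, awaiting =>
    let role := (PySem.Dict.mk message).get? "role"
    if role == some "user" then
      let user_turns := user_turns + 1
      let awaiting := if user_turns ≥ rounds_per_chunk then true else awaiting
      match firstCut rounds_per_chunk rest user_turns awaiting with
      | some n => some (n + 1)
      | none => none
    else if role == some "assistant" && awaiting then some 1
    else
      match firstCut rounds_per_chunk rest user_turns awaiting with
      | some n => some (n + 1)
      | none => none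

theorem firstCut_pos (r : Int) :
    ∀ (ms : List (List (String × String))) (u : Int) (aw : Bool) (n : Nat),
      firstCut r ms u aw = some n → 1 ≤ n := by
  intro ms
  induction ms with
  | nil => intro u aw n h; simp [firstCut] at h
  | cons m rest ih =>
    intro u aw n h
    simp only [firstCut] at h
    split at h
    · rcases hm : firstCut r rest (u + 1)
        (if u + 1 ≥ r then true else aw) with _ | k <;> rw [hm] at h <;> simp at h
      omega
    · split at h
      · simp at h; omega
      · rcases hm : firstCut r rest u aw with _ | k <;> rw [hm] at h <;> simp at h
        omega

-- the driver loop of B: slice off the first chunk, restart on the suffix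
def chunksGo (rounds_per_chunk : Int) (rest : List (List (String × String))) :
    List (List (List (String × String))) :=
  if hne : rest = [] then []
  else
    match hc : firstCut rounds_per_chunk rest 0 false with
    | none => [rest]
    | some cut => rest.take cut :: chunksGo rounds_per_chunk (rest.drop cut)
termination_by rest.length
decreasing_by
  have h1 : 1 ≤ cut := firstCut_pos rounds_per_chunk rest 0 false cut hc
  have h2 : 0 < rest.length := List.length_pos_iff.mpr hne
  simp [List.length_drop]; omega

def chunk_messages_alt (messages : List (List (String × String))) (rounds_per_chunk : Int) : List (List (List (String × String))) :=
  chunksGo rounds_per_chunk messages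

-- ===== PRECONDITION & SPEC =====
def Spec_chunk_messages (messages : List (List (String × String))) (rounds_per_chunk : Int) (out : List (List (List (String × String)))) : Prop := out = chunk_messages_alt messages rounds_per_chunk
instance (messages : List (List (String × String))) (rounds_per_chunk : Int) (out : List (List (List (String × String)))) : Decidable (Spec_chunk_messages messages rounds_per_chunk out) := by unfold Spec_chunk_messages; infer_instance

-- ===== CLAIM (what is proved, stated in full; the proofs are below) =====
def Claim_equal_chunk_messages : Prop := ∀ (messages : List (List (String × String))) (rounds_per_chunk : Int), Dom_chunk_messages messages rounds_per_chunk → Spec_chunk_messages messages rounds_per_chunk (chunk_messages messages rounds_per_chunk)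

-- ===== LEMMAS AND PROOFS =====

-- what A's remaining run produces from an arbitrary mid-loop state, phrased via firstCut
def glue (r : Int) (cur : List (List (String × String))) (u : Int) (aw : Bool)
    (ms : List (List (String × String))) : List (List (List (String × String))) :=
  match firstCut r ms u aw with
  | none => if cur ++ ms = [] then [] else [cur ++ ms]
  | some n => (cur ++ ms.take n) :: chunksGo r (ms.drop n)

def finishA (st : List (List (List (String × String))) × List (List (String × String)) × Int × Bool) :
    List (List (List (String × String))) :=
  if st.2.1 ≠ [] then st.1 ++ [st.2.1] else st.1

theorem chunksGo_eq_glue (r : Int) (ms : List (List (String × String))) :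
    chunksGo r ms = glue r [] 0 false ms := by
  rw [chunksGo]
  rcases ms with _ | ⟨m, rest⟩
  · simp [glue, firstCut]
  · simp only [reduceDIte, reduceCtorEq]
    rcases hc : firstCut r (m :: rest) 0 false with _ | n <;> simp [glue, hc]

theorem foldl_glue (r : Int) :
    ∀ (ms : List (List (String × String)))
      (chunks : List (List (List (String × String))))
      (cur : List (List (String × String))) (u : Int) (aw : Bool),
      finishA (ms.foldl (chunkStepA r) (chunks, cur, u, aw))
        = chunks ++ glue r cur u aw ms := by
  intro ms
  induction ms with
  | nil =>
    intro chunks cur u aw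
    by_cases h : cur = [] <;> simp [finishA, glue, firstCut, h]
  | cons m rest ih =>
    intro chunks cur u aw
    simp only [List.foldl_cons]
    by_cases hu : ((PySem.Dict.mk m).get? "role" == some "user") = true
    · -- user branch
      simp only [chunkStepA, hu, if_pos]
      rw [ih]
      simp only [glue, firstCut, hu, if_pos]
      rcases hc : firstCut r rest (u + 1) (if u + 1 ≥ r then true else aw) with _ | n
      · simp [List.append_assoc]
      · simp [List.append_assoc]
    · by_cases ha : ((PySem.Dict.mk m).get? "role" == some "assistant" && aw) = true
      · -- flush branch
        simp only [chunkStepA, hu, if_neg, ha, if_pos, Bool.not_eq_true]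
        rw [ih, ← chunksGo_eq_glue]
        simp only [glue, firstCut, hu, ha, if_neg, if_pos, Bool.not_eq_true,
          List.take_succ_cons, List.take_zero, List.drop_succ_cons, List.drop_zero]
        simp [List.append_assoc]
      · -- plain branch
        simp only [chunkStepA, hu, ha, if_neg, Bool.not_eq_true]
        rw [ih]
        simp only [glue, firstCut, hu, ha, if_neg, Bool.not_eq_true]
        rcases hc : firstCut r rest u aw with _ | n
        · simp [List.append_assoc]
        · simp [List.append_assoc]

-- ===== VERDICT (by name: the statement is the Claim_ definition above) =====
theorem chunk_messages_spec : Claim_equal_chunk_messages := by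
  intro messages r _
  show chunk_messages messages r = chunk_messages_alt messages r
  have h := foldl_glue r messages [] [] 0 false
  simpa [chunk_messages, finishA, chunk_messages_alt, chunksGo_eq_glue] using h
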